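-- pv_equiv track=rewrite | github.com/pchaos/others | python/bigint.py | double_digit_count
-- ===== SOURCE A (Python) =====
-- def double_digit_count(n):
--     xlist = []
--     """计算满足条件的 x 的值"""
--     for i in range(n):
--         x1 = (2 * 10**i - 4) % 19 == 0
--         if x1:
--             numerator = 2 * 10**i - 4  # 使用整数类型
--             denominator = 19
--             x = numerator // denominator  # 使用整数除法
--             xlist.append(x)
--     return xlist
-- ===== SOURCE B (Python) =====
-- def double_digit_count(n):
--     # (2*10**i - 4) % 19 == 0  iff  10**i = 2 (mod 19)  iff  i = 17 (mod 18)
--     # (10 has multiplicative order 18 mod 19 and 10**17 = 2 mod 19), so only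
--     # every 18th index qualifies: enumerate those directly, no divisibility test.
--     return [(2 * 10 ** i - 4) // 19 for i in range(17, n, 18)]
-- ===== Notes on version B (the rewrite author's own statement) =====
-- stated objective: faster
-- what changed: B replaces the scan of all i in range(n) with a divisibility test by the number-theoretic characterization that (2*10^i-4) % 19 == 0 iff i = 17 (mod 18), iterating only over range(17, n, 18) and building the big integer only at qualifying indices.
import Mathlib
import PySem

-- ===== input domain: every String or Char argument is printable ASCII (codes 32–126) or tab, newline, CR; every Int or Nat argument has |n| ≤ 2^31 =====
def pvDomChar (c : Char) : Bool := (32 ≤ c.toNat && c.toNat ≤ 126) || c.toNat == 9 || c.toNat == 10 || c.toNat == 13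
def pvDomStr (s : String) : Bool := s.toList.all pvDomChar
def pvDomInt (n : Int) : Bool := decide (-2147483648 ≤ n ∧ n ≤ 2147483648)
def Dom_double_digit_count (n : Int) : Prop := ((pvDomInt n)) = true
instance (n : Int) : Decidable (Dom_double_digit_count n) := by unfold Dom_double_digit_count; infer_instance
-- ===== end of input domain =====

-- B iterates only over i = 17, 35, 53, … (i ≡ 17 mod 18), the exact indices where
-- 19 divides 2·10^i − 4, instead of testing divisibility for every i < n.


-- ===== PORT A =====
-- i ranges over range(n), hence 0 ≤ i, so 10**i is ported exactly as 10 ^ i.toNat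
def double_digit_count (n : Int) : List Int :=
  (PySem.List.pyRange 0 n 1).foldl
    (fun xlist i =>
      let x1 := PySem.Int.mod (2 * 10 ^ i.toNat - 4) 19 == 0
      if x1 then
        let numerator := 2 * 10 ^ i.toNat - 4
        let denominator : Int := 19
        let x := PySem.Int.floordiv numerator denominator
        xlist ++ [x]
      else xlist)
    []

-- ===== PORT B =====
-- i ranges over range(17, n, 18), hence 0 ≤ i, so 10**i is ported exactly as 10 ^ i.toNat
def double_digit_count_alt (n : Int) : List Int :=
  (PySem.List.pyRange 17 n 18).map
    (fun i => PySem.Int.floordiv (2 * 10 ^ i.toNat - 4) 19)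

-- ===== PRECONDITION & SPEC =====
def Spec_double_digit_count (n : Int) (out : List Int) : Prop := out = double_digit_count_alt n
instance (n : Int) (out : List Int) : Decidable (Spec_double_digit_count n out) := by unfold Spec_double_digit_count; infer_instance

-- ===== CLAIM (what is proved, stated in full; the proofs are below) =====
def Claim_equal_double_digit_count : Prop := ∀ (n : Int), Dom_double_digit_count n → Spec_double_digit_count n (double_digit_count n)

-- ===== LEMMAS AND PROOFS =====

-- The key number-theoretic fact: 19 ∣ 2·10^i − 4  iff  i ≡ 17 (mod 18).
lemma pv_cond_iff (i : Nat) : ((2 * 10 ^ i - 4 : Int) % 19 = 0) ↔ i % 18 = 17 := by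
  induction i using Nat.strong_induction_on with
  | _ i ih =>
    by_cases h : i < 18
    · interval_cases i <;> decide
    · obtain ⟨j, rfl⟩ : ∃ j, i = j + 18 := ⟨i - 18, by omega⟩
      have h18 : (10 : Int) ^ 18 ≡ 1 [ZMOD 19] := by decide
      have hp : (10 : Int) ^ (j + 18) ≡ 10 ^ j [ZMOD 19] := by
        calc (10 : Int) ^ (j + 18) = 10 ^ j * 10 ^ 18 := by ring
          _ ≡ 10 ^ j * 1 [ZMOD 19] := Int.ModEq.mul_left _ h18
          _ = 10 ^ j := mul_one _
      have hper : (2 * 10 ^ (j + 18) - 4 : Int) % 19 = (2 * 10 ^ j - 4) % 19 :=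
        (hp.mul_left 2).sub_right 4
      rw [hper, ih j (by omega)]
      omega

-- Numbers below N congruent to 17 mod 18 are exactly 18·j + 17 for j < N/18.
lemma pv_filter_range_17 (N : Nat) :
    (List.range N).filter (fun i => i % 18 == 17)
      = (List.range (N / 18)).map (fun j => 18 * j + 17) := by
  induction N with
  | zero => rfl
  | succ N ih =>
    rw [List.range_succ, List.filter_append, ih]
    by_cases h : N % 18 = 17
    · have h2 : (N + 1) / 18 = N / 18 + 1 := by omega
      have h3 : 18 * (N / 18) + 17 = N := by omega
      rw [h2, List.range_succ, List.map_append]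
      simp [h, h3]
    · have h2 : (N + 1) / 18 = N / 18 := by omega
      simp [h, h2]

theorem pv_equal (n : Int) : double_digit_count n = double_digit_count_alt n := by
  unfold double_digit_count double_digit_count_alt
  show (PySem.List.pyRange 0 n 1).foldl
      (fun xlist i =>
        if PySem.Int.mod (2 * 10 ^ i.toNat - 4) 19 == 0 then
          xlist ++ [PySem.Int.floordiv (2 * 10 ^ i.toNat - 4) 19]
        else xlist) [] =
    (PySem.List.pyRange 17 n 18).map (fun i => PySem.Int.floordiv (2 * 10 ^ i.toNat - 4) 19)
  rw [PySem.List.foldl_append_if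
        (fun i : Int => PySem.Int.mod (2 * 10 ^ i.toNat - 4) 19 == 0)
        (fun i : Int => PySem.Int.floordiv (2 * 10 ^ i.toNat - 4) 19)]
  rw [PySem.List.pyRange_zero, PySem.List.pyRange_of_pos 17 n (by norm_num)]
  rw [List.filter_map, List.map_map, List.map_map]
  have hc : ∀ i : Nat,
      ((fun i : Int => PySem.Int.mod (2 * 10 ^ i.toNat - 4) 19 == 0) ∘ (fun k : Nat => (k : Int))) i
        = (fun i : Nat => i % 18 == 17) i := by
    intro i
    have hm : PySem.Int.mod (2 * 10 ^ (i : Int).toNat - 4) 19 = (2 * 10 ^ i - 4) % 19 := by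
      rw [Int.toNat_natCast]; exact PySem.Int.mod_eq_emod_of_pos (by norm_num)
    simp only [Function.comp, hm]
    rw [Bool.eq_iff_iff, beq_iff_eq, beq_iff_eq]
    exact pv_cond_iff i
  rw [List.filter_congr (fun i _ => hc i), pv_filter_range_17, List.map_map]
  have hcnt : (if (17 : Int) < n then ((n - 17 + 18 - 1) / 18).toNat else 0) = n.toNat / 18 := by
    split_ifs with h <;> omega
  rw [hcnt]
  apply List.map_congr_left
  intro j _
  simp only [Function.comp]
  have ht : ((17 : Int) + 18 * (j : Int)).toNat = 18 * j + 17 := by omega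
  rw [ht, Int.toNat_natCast]

-- ===== VERDICT (by name: the statement is the Claim_ definition above) =====
theorem double_digit_count_spec : Claim_equal_double_digit_count := by
  intro n _
  unfold Spec_double_digit_count
  exact pv_equal n
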